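-- pv_equiv track=rewrite | github.com/tlucanti/contest | Google/CodeJam/2020-2021/1D/B.py | solver_slow
-- ===== SOURCE A (Python) =====
-- def solver_slow(x, y, s):
-- 	q = s.count('?')
-- 	s = list(s)
-- 	qq = []
-- 	n = len(s)
-- 	ans = None
-- 	for i in range(n):
-- 		if s[i] == '?':
-- 			qq.append(i)
-- 	for i in range(pow(2, q)):
-- 		b = bin(i)[2:]
-- 		b = '0' * (q - len(b)) + b
-- 		for j in range(q):
-- 			s[qq[j]] = 'C' if b[j] == '1' else 'J'
-- 		ans_s = ''.join(s)
-- 		if ans is None: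
-- 			ans = ans_s.count('CJ') * x + ans_s.count('JC') * y
-- 		else:
-- 			ans = min(ans, ans_s.count('CJ') * x + ans_s.count('JC') * y)
-- 	return ans
-- ===== SOURCE B (Python) =====
-- def _addN(v, d):
--     return None if v is None else v + d
--
--
-- def _minN(*vs):
--     best = None
--     for v in vs:
--         if v is not None and (best is None or v < best):
--             best = v
--     return best
--
--
-- def solver_slow(x, y, s):
--     # DP over positions; state = last character class (C / J / other), min cost so far
--     bc, bj, bo = None, None, 0
--     for ch in s:
--         cc = _minN(bc, _addN(bj, y), bo)
--         jj = _minN(_addN(bc, x), bj, bo)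
--         oo = _minN(bc, bj, bo)
--         if ch == 'C':
--             bc, bj, bo = cc, None, None
--         elif ch == 'J':
--             bc, bj, bo = None, jj, None
--         elif ch == '?':
--             bc, bj, bo = cc, jj, None
--         else:
--             bc, bj, bo = None, None, oo
--     return _minN(bc, bj, bo)
-- ===== Notes on version B (the rewrite author's own statement) =====
-- stated objective: alternative
-- what changed: A enumerates all 2^q fillings of the '?' characters and recounts 'CJ'/'JC' substrings for each; B runs a single left-to-right DP over the string whose state is the minimal cost for each class of last character (C, J, other).
import Mathlib
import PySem

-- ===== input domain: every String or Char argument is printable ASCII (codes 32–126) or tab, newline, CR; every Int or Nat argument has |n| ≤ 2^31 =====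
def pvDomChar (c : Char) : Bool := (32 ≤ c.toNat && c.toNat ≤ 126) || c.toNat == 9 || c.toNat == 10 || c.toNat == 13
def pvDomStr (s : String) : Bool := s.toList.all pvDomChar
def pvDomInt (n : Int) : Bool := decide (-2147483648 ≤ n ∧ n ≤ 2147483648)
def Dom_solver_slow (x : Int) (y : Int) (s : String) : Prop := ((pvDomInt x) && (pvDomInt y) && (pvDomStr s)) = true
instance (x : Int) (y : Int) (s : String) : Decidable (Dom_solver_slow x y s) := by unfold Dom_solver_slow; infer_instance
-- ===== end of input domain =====

-- B replaces A's brute force over all 2^q fillings of '?' by a one-pass DP over the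
-- string with state = last character class (C / J / other); objective: alternative algorithm.

-- ===== PORT A =====
def solver_slow (x : Int) (y : Int) (s : String) : Int :=
  let q := PySem.Str.count s "?"
  let sl := s.toList
  let n := sl.length
  let qq := (PySem.List.pyRange 0 (n : Int) 1).foldl
      (fun acc i => if PySem.List.pyGetD sl i ' ' == '?' then acc ++ [i] else acc) ([] : List Int)
  let r := (PySem.List.pyRange 0 ((2 ^ q : Nat) : Int) 1).foldl
      (fun (st : List Char × Option Int) i =>
        let b0 := PySem.List.slice (PySem.Int.toBinChars0b i) (some 2) none
        let b := List.replicate (q - b0.length) '0' ++ b0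
        let t := (PySem.List.pyRange 0 (q : Int) 1).foldl
            (fun u j => u.set (PySem.List.pyGetD qq j 0).toNat
                (if PySem.List.pyGetD b j ' ' == '1' then 'C' else 'J')) st.1
        let cost := (PySem.Chars.count t ['C', 'J'] : Int) * x + (PySem.Chars.count t ['J', 'C'] : Int) * y
        (t, match st.2 with
            | none => some cost
            | some a => some (min a cost)))
      (sl, (none : Option Int))
  (r.2).getD 0

-- ===== PORT B =====
-- _minN(*vs): running minimum over a list of optional values
def ominN (l : List (Option Int)) : Option Int :=
  l.foldl (fun best v =>
    match v with
    | none => best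
    | some w =>
      match best with
      | none => some w
      | some b => if w < b then some w else some b) none

-- _addN(v, d)
def oaddN (v : Option Int) (d : Int) : Option Int :=
  match v with
  | none => none
  | some w => some (w + d)

def solver_slow_alt (x : Int) (y : Int) (s : String) : Int :=
  let fin := s.toList.foldl
    (fun (st : Option Int × Option Int × Option Int) ch =>
      let bc := st.1; let bj := st.2.1; let bo := st.2.2
      let cc := ominN [bc, oaddN bj y, bo]
      let jj := ominN [oaddN bc x, bj, bo]
      let oo := ominN [bc, bj, bo]
      if ch = 'C' then (cc, none, none)
      else if ch = 'J' then (none, jj, none)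
      else if ch = '?' then (cc, jj, none)
      else (none, none, oo))
    (none, none, some 0)
  (ominN [fin.1, fin.2.1, fin.2.2]).getD 0

-- ===== PRECONDITION & SPEC =====
def Spec_solver_slow (x : Int) (y : Int) (s : String) (out : Int) : Prop := out = solver_slow_alt x y s
instance (x : Int) (y : Int) (s : String) (out : Int) : Decidable (Spec_solver_slow x y s out) := by unfold Spec_solver_slow; infer_instance

-- ===== CLAIM (what is proved, stated in full; the proofs are below) =====
def Claim_equal_solver_slow : Prop := ∀ (x : Int) (y : Int) (s : String), Dom_solver_slow x y s → Spec_solver_slow x y s (solver_slow x y s)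

-- ===== LEMMAS AND PROOFS =====

-- cost of one adjacent pair
def qstep (x y : Int) (d e : Char) : Int :=
  if d = 'C' ∧ e = 'J' then x else if d = 'J' ∧ e = 'C' then y else 0

-- total transition cost of a filled string
def costPairs (x y : Int) : List Char → Int
  | d :: e :: t => qstep x y d e + costPairs x y (e :: t)
  | _ => 0

-- number of adjacent (a,b) pairs
def pairCnt (a b : Char) : List Char → Nat
  | d :: e :: t => (if d = a ∧ e = b then 1 else 0) + pairCnt a b (e :: t)
  | _ => 0

-- all completions of a template ('J'-choice first, matching bit 0)
def comps : List Char → List (List Char)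
  | [] => [[]]
  | c :: t =>
    if c = '?' then (comps t).map (fun u => 'J' :: u) ++ (comps t).map (fun u => 'C' :: u)
    else (comps t).map (fun u => c :: u)

-- big-endian q-bit binary representation
def bitsBE : Nat → Nat → List Char
  | 0, _ => []
  | q + 1, n => (if n / 2 ^ q = 0 then '0' else '1') :: bitsBE q (n % 2 ^ q)

-- fill the '?' of a template from a bit list
def fill : List Char → List Char → List Char
  | [], _ => []
  | c :: t, bs =>
    if c = '?' then
      match bs with
      | b :: bs' => (if b = '1' then 'C' else 'J') :: fill t bs'
      | [] => '?' :: fill t []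
    else c :: fill t bs

-- positions of '?' in a template
def qIdx : List Char → List Nat
  | [] => []
  | c :: t => if c = '?' then 0 :: (qIdx t).map (· + 1) else (qIdx t).map (· + 1)

-- running minimum, as A accumulates it
def optMin (l : List Int) : Option Int :=
  l.foldl (fun a v => match a with | none => some v | some w => some (min w v)) none

def omin : Option Int → Option Int → Option Int
  | none, b => b
  | some a, none => some a
  | some a, some b => some (min a b)

-- class of the last character of a completion
def classify (t : List Char) : Char :=
  match t.getLast? with
  | none => 'O'
  | some d => if d = 'C' then 'C' else if d = 'J' then 'J' else 'O'

-- the DP value of one state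
def gval (x y : Int) (c : Char) (p : List Char) : Option Int :=
  optMin (((comps p).filter (fun t => classify t == c)).map (costPairs x y))

-- ---- omin / optMin algebra ----
theorem omin_none_left (b : Option Int) : omin none b = b := rfl
theorem omin_assoc (a b c : Option Int) : omin (omin a b) c = omin a (omin b c) := by
  cases a <;> cases b <;> cases c <;> simp [omin, min_assoc]
theorem omin_comm (a b : Option Int) : omin a b = omin b a := by
  cases a <;> cases b <;> simp [omin, min_comm]

theorem optMin_foldl (l : List Int) (a0 : Option Int) :
    l.foldl (fun a v => match a with | none => some v | some w => some (min w v)) a0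
      = omin a0 (optMin l) := by
  induction l generalizing a0 with
  | nil => cases a0 <;> rfl
  | cons v t ih =>
    have hstep : (fun (a : Option Int) (v : Int) =>
        (match a with | none => some v | some w => some (min w v))) = fun a v => omin a (some v) := by
      funext a v; cases a <;> rfl
    show List.foldl _ _ t = _
    rw [show optMin (v :: t) = List.foldl _ (some v) t from rfl]
    rw [ih, ih (some v), hstep, omin_assoc]

theorem optMin_cons (v : Int) (l : List Int) : optMin (v :: l) = omin (some v) (optMin l) := by
  show List.foldl _ _ l = _
  rw [optMin_foldl]

theorem optMin_map_add (l : List α) (f : α → Int) (k : Int) :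
    optMin (l.map (fun t => f t + k)) = oaddN (optMin (l.map f)) k := by
  induction l with
  | nil => rfl
  | cons v t ih =>
    simp only [List.map_cons, optMin_cons, ih]
    cases optMin (t.map f) <;> simp [omin, oaddN, min_add_add_right]

theorem ominN3 (a b c : Option Int) : ominN [a, b, c] = omin (omin a b) c := by
  have hstep : (fun (best v : Option Int) =>
      match v with
      | none => best
      | some w =>
        match best with
        | none => some w
        | some b => if w < b then some w else some b) = omin := by
    funext best v
    cases v with
    | none => cases best <;> rfl
    | some w =>
      cases best with
      | none => rfl
      | some b => simp [omin, min_def]; split_ifs <;> first | rfl | omega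
  show List.foldl _ none [a, b, c] = _
  rw [hstep]
  simp [List.foldl, omin_none_left]

theorem oaddN_zero (a : Option Int) : oaddN a 0 = a := by cases a <;> simp [oaddN]

theorem omin_left_comm (a b c : Option Int) : omin a (omin b c) = omin b (omin a c) := by
  rw [← omin_assoc, omin_comm a b, omin_assoc]

theorem classify_cases (t : List Char) : classify t = 'C' ∨ classify t = 'J' ∨ classify t = 'O' := by
  unfold classify
  cases t.getLast? with
  | none => simp
  | some d => dsimp only; split_ifs <;> simp

theorem classify_concat (t : List Char) (d : Char) :
    classify (t ++ [d]) = if d = 'C' then 'C' else if d = 'J' then 'J' else 'O' := by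
  unfold classify
  rw [List.getLast?_concat]

theorem costPairs_snoc (x y : Int) (t : List Char) (d : Char) :
    costPairs x y (t ++ [d]) = costPairs x y t + qstep x y (classify t) d := by
  induction t with
  | nil => simp [costPairs, classify, qstep]
  | cons a t ih =>
    cases t with
    | nil =>
      simp [costPairs, classify, qstep, List.getLast?]
      split_ifs <;> simp_all
    | cons b t2 =>
      have h1 : costPairs x y ((a :: b :: t2) ++ [d]) = qstep x y a b + costPairs x y ((b :: t2) ++ [d]) := rfl
      have h2 : costPairs x y (a :: b :: t2) = qstep x y a b + costPairs x y (b :: t2) := rfl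
      have h3 : classify (a :: b :: t2) = classify (b :: t2) := by
        unfold classify; rw [List.getLast?_cons_cons]
      rw [h1, ih, h2, h3]; ring

theorem optMin_partition (l : List (List Char)) (f : List Char → Int) :
    optMin (l.map f) =
      omin (omin (optMin ((l.filter (fun t => classify t == 'C')).map f))
                 (optMin ((l.filter (fun t => classify t == 'J')).map f)))
           (optMin ((l.filter (fun t => classify t == 'O')).map f)) := by
  induction l with
  | nil => rfl
  | cons v t ih =>
    rcases classify_cases v with h | h | h <;>
      simp [h, optMin_cons, ih, omin_assoc, omin_left_comm]

theorem comps_snoc_q (p : List Char) :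
    comps (p ++ ['?']) = (comps p).flatMap (fun t => [t ++ ['J'], t ++ ['C']]) := by
  induction p with
  | nil => rfl
  | cons c t ih =>
    by_cases hc : c = '?' <;>
      simp [comps, hc, ih, List.flatMap_append, List.map_flatMap, List.flatMap_map]

theorem comps_snoc (p : List Char) (ch : Char) (h : ch ≠ '?') :
    comps (p ++ [ch]) = (comps p).map (fun t => t ++ [ch]) := by
  induction p with
  | nil => simp [comps, h]
  | cons c t ih =>
    by_cases hc : c = '?' <;>
      simp [comps, hc, ih, List.map_map, Function.comp_def]

theorem optMin_costSnoc (x y : Int) (p : List Char) (d : Char) :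
    optMin ((comps p).map (fun t => costPairs x y (t ++ [d]))) =
      omin (omin (oaddN (gval x y 'C' p) (qstep x y 'C' d))
                 (oaddN (gval x y 'J' p) (qstep x y 'J' d)))
           (oaddN (gval x y 'O' p) (qstep x y 'O' d)) := by
  have h1 : (comps p).map (fun t => costPairs x y (t ++ [d]))
      = (comps p).map (fun t => costPairs x y t + qstep x y (classify t) d) := by
    simp [costPairs_snoc]
  have hcls : ∀ c : Char,
      ((comps p).filter (fun t => classify t == c)).map (fun t => costPairs x y t + qstep x y (classify t) d)
        = ((comps p).filter (fun t => classify t == c)).map (fun t => costPairs x y t + qstep x y c d) := by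
    intro c
    apply List.map_congr_left
    intro t ht
    have := (List.mem_filter.mp ht).2
    rw [beq_iff_eq] at this
    rw [this]
  rw [h1, optMin_partition (comps p) (fun t => costPairs x y t + qstep x y (classify t) d)]
  rw [hcls 'C', hcls 'J', hcls 'O']
  rw [optMin_map_add, optMin_map_add, optMin_map_add]
  rfl

theorem gval_concat (x y : Int) (c' d : Char) (hd : d ≠ '?') (p : List Char) :
    gval x y c' (p ++ [d]) =
      if (if d = 'C' then 'C' else if d = 'J' then 'J' else 'O') = c' then
        omin (omin (oaddN (gval x y 'C' p) (qstep x y 'C' d))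
                   (oaddN (gval x y 'J' p) (qstep x y 'J' d)))
             (oaddN (gval x y 'O' p) (qstep x y 'O' d))
      else none := by
  unfold gval
  rw [comps_snoc p d hd, List.filter_map]
  have hpred : ((fun t => classify t == c') ∘ fun t => t ++ [d])
      = fun t => ((if d = 'C' then 'C' else if d = 'J' then 'J' else 'O') == c') := by
    funext t
    simp [Function.comp, classify_concat]
  rw [hpred]
  by_cases hif : (if d = 'C' then 'C' else if d = 'J' then 'J' else 'O') = c'
  · rw [if_pos hif]
    have : (List.filter (fun t => ((if d = 'C' then 'C' else if d = 'J' then 'J' else 'O') == c'))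
        (comps p)) = comps p := by
      apply List.filter_eq_self.mpr
      intro t _
      simp [hif]
    rw [this, List.map_map]
    rw [show ((costPairs x y) ∘ fun t => t ++ [d]) = fun t => costPairs x y (t ++ [d]) from rfl]
    exact optMin_costSnoc x y p d
  · have : (List.filter (fun t => ((if d = 'C' then 'C' else if d = 'J' then 'J' else 'O') == c'))
        (comps p)) = [] := by
      apply List.filter_eq_nil_iff.mpr
      intro t _
      simp [hif]
    rw [if_neg hif, this]
    rfl

theorem flatMap_single {α β : Type} (l : List α) (f : α → β) :
    l.flatMap (fun a => [f a]) = l.map f := by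
  induction l with
  | nil => rfl
  | cons a t ih => simp [List.flatMap_cons, ih]

theorem flatMap_nil_fun {α β : Type} (l : List α) :
    l.flatMap (fun (_ : α) => ([] : List β)) = [] := by
  induction l with
  | nil => rfl
  | cons a t ih => simp [List.flatMap_cons, ih]

theorem gval_q_concat (x y : Int) (c' : Char) (p : List Char)
    (hc : c' = 'C' ∨ c' = 'J' ∨ c' = 'O') :
    gval x y c' (p ++ ['?']) =
      if c' = 'O' then none
      else omin (omin (oaddN (gval x y 'C' p) (qstep x y 'C' c'))
                     (oaddN (gval x y 'J' p) (qstep x y 'J' c')))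
               (oaddN (gval x y 'O' p) (qstep x y 'O' c')) := by
  unfold gval
  rw [comps_snoc_q p, List.filter_flatMap]
  rcases hc with h | h | h <;> subst h
  · have : ∀ t : List Char,
        (([t ++ ['J'], t ++ ['C']]).filter (fun u => classify u == 'C')) = [t ++ ['C']] := by
      intro t
      simp [List.filter_cons, classify_concat]
    simp only [this]
    rw [flatMap_single (comps p) (fun a => a ++ ['C'])]
    rw [if_neg (by decide)]
    rw [show (List.map (costPairs x y) (List.map (fun t => t ++ ['C']) (comps p)))
        = List.map (fun t => costPairs x y (t ++ ['C'])) (comps p) by rw [List.map_map]; rfl]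
    exact optMin_costSnoc x y p 'C'
  · have : ∀ t : List Char,
        (([t ++ ['J'], t ++ ['C']]).filter (fun u => classify u == 'J')) = [t ++ ['J']] := by
      intro t
      simp [List.filter_cons, classify_concat]
    simp only [this]
    rw [flatMap_single (comps p) (fun a => a ++ ['J'])]
    rw [if_neg (by decide)]
    rw [show (List.map (costPairs x y) (List.map (fun t => t ++ ['J']) (comps p)))
        = List.map (fun t => costPairs x y (t ++ ['J'])) (comps p) by rw [List.map_map]; rfl]
    exact optMin_costSnoc x y p 'J'
  · have : ∀ t : List Char,
        (([t ++ ['J'], t ++ ['C']]).filter (fun u => classify u == 'O')) = [] := by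
      intro t
      simp [List.filter_cons, classify_concat]
    simp only [this]
    rw [flatMap_nil_fun (comps p)]
    simp [optMin]

theorem B_inv (x y : Int) (p : List Char) :
    p.foldl (fun (st : Option Int × Option Int × Option Int) ch =>
      let bc := st.1; let bj := st.2.1; let bo := st.2.2
      let cc := ominN [bc, oaddN bj y, bo]
      let jj := ominN [oaddN bc x, bj, bo]
      let oo := ominN [bc, bj, bo]
      if ch = 'C' then (cc, none, none)
      else if ch = 'J' then (none, jj, none)
      else if ch = '?' then (cc, jj, none)
      else (none, none, oo))
    (none, none, some 0)
    = (gval x y 'C' p, gval x y 'J' p, gval x y 'O' p) := by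
  induction p using List.reverseRecOn with
  | nil =>
    simp [gval, comps, classify, optMin, List.filter, costPairs]
  | append_singleton p ch ih =>
    rw [List.foldl_append, ih]
    simp only [List.foldl_cons, List.foldl_nil]
    by_cases h1 : ch = 'C'
    · subst h1
      rw [gval_concat x y 'C' 'C' (by decide) p, gval_concat x y 'J' 'C' (by decide) p,
        gval_concat x y 'O' 'C' (by decide) p]
      simp [ominN3, qstep, oaddN_zero]
    · by_cases h2 : ch = 'J'
      · subst h2
        rw [gval_concat x y 'C' 'J' (by decide) p, gval_concat x y 'J' 'J' (by decide) p,
          gval_concat x y 'O' 'J' (by decide) p]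
        simp [ominN3, qstep, oaddN_zero]
      · by_cases h3 : ch = '?'
        · subst h3
          rw [gval_q_concat x y 'C' p (by decide), gval_q_concat x y 'J' p (by decide),
            gval_q_concat x y 'O' p (by decide)]
          simp [ominN3, qstep, oaddN_zero]
        · rw [gval_concat x y 'C' ch h3 p, gval_concat x y 'J' ch h3 p,
            gval_concat x y 'O' ch h3 p]
          have hcl : (if ch = 'C' then 'C' else if ch = 'J' then 'J' else 'O') = 'O' := by
            simp [h1, h2]
          rw [hcl]
          have hq : ∀ c : Char, qstep x y c ch = 0 := by
            intro c
            unfold qstep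
            simp [h1, h2]
          simp [ominN3, hq, oaddN_zero, h1, h2, h3]

theorem solver_slow_B_char (x y : Int) (s : String) :
    solver_slow_alt x y s = (optMin ((comps s.toList).map (costPairs x y))).getD 0 := by
  unfold solver_slow_alt
  rw [B_inv x y s.toList]
  show (ominN [gval x y 'C' s.toList, gval x y 'J' s.toList, gval x y 'O' s.toList]).getD 0 = _
  rw [ominN3, optMin_partition (comps s.toList) (costPairs x y)]
  rfl

theorem pairCnt_head_ne (a b d : Char) (t : List Char) (hd : d ≠ a) :
    pairCnt a b (d :: t) = pairCnt a b t := by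
  cases t with
  | nil => rfl
  | cons e t2 => simp [pairCnt, hd]

theorem count_go_nil (sub : List Char) (fuel acc : Nat) :
    PySem.Chars.count.go sub fuel [] acc = acc := by
  cases fuel <;> simp [PySem.Chars.count.go]

theorem count_go_pair (a b : Char) (hab : a ≠ b) :
    ∀ (fuel : Nat) (l : List Char) (acc : Nat), l.length ≤ fuel →
      PySem.Chars.count.go [a, b] fuel l acc = acc + pairCnt a b l := by
  intro fuel
  induction fuel with
  | zero =>
    intro l acc h
    have hl : l = [] := by
      cases l with
      | nil => rfl
      | cons c t => simp at h
    subst hl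
    simp [count_go_nil, pairCnt]
  | succ fuel ih =>
    intro l acc h
    cases l with
    | nil => simp [count_go_nil, pairCnt]
    | cons c t =>
      cases t with
      | nil =>
        have hpre : List.isPrefixOf [a, b] [c] = false := by
          simp [List.isPrefixOf]
        simp only [PySem.Chars.count.go, hpre, Bool.false_eq_true, if_false]
        simp [count_go_nil, pairCnt]
      | cons d t2 =>
        by_cases hp : c = a ∧ d = b
        · have hc := hp.1
          have hdd := hp.2
          have hpre : List.isPrefixOf [a, b] (c :: d :: t2) = true := by
            simp [List.isPrefixOf, hc, hdd]
          simp only [PySem.Chars.count.go, hpre, if_true]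
          have hlen : t2.length ≤ fuel := by simp at h; omega
          rw [show List.drop (List.length [a, b]) (c :: d :: t2) = t2 from rfl]
          rw [ih t2 (acc + 1) hlen]
          have hd' : d ≠ a := by rw [hdd]; exact Ne.symm hab
          have h2 : pairCnt a b (c :: d :: t2) = 1 + pairCnt a b (d :: t2) := by
            simp [pairCnt, hc, hdd]
          rw [h2, pairCnt_head_ne a b d t2 hd']
          omega
        · have hpre : List.isPrefixOf [a, b] (c :: d :: t2) = false := by
            simp only [List.isPrefixOf]
            by_cases h1 : a = c <;> by_cases h2 : b = d <;> simp_all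
          simp only [PySem.Chars.count.go, hpre, Bool.false_eq_true, if_false]
          have hlen : (d :: t2).length ≤ fuel := by simp at h ⊢; omega
          rw [ih (d :: t2) acc hlen]
          have h2 : pairCnt a b (c :: d :: t2) = pairCnt a b (d :: t2) := by
            simp [pairCnt, hp]
          rw [h2]

theorem count_go_one (c : Char) :
    ∀ (fuel : Nat) (l : List Char) (acc : Nat), l.length ≤ fuel →
      PySem.Chars.count.go [c] fuel l acc = acc + l.count c := by
  intro fuel
  induction fuel with
  | zero =>
    intro l acc h
    have hl : l = [] := by
      cases l with
      | nil => rfl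
      | cons a t => simp at h
    subst hl
    simp [count_go_nil]
  | succ fuel ih =>
    intro l acc h
    cases l with
    | nil => simp [count_go_nil]
    | cons a t =>
      have hlen : t.length ≤ fuel := by simp at h; omega
      by_cases hc : c = a
      · have hpre : List.isPrefixOf [c] (a :: t) = true := by simp [List.isPrefixOf, hc]
        simp only [PySem.Chars.count.go, hpre, if_true]
        rw [show List.drop (List.length [c]) (a :: t) = t from rfl]
        rw [ih t (acc + 1) hlen]
        rw [List.count_cons]
        simp [hc]
        omega
      · have hpre : List.isPrefixOf [c] (a :: t) = false := by simp [List.isPrefixOf, hc]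
        simp only [PySem.Chars.count.go, hpre, Bool.false_eq_true, if_false]
        rw [ih t acc hlen, List.count_cons]
        simp [Ne.symm hc]

theorem chars_count_pair (l : List Char) (a b : Char) (hab : a ≠ b) :
    PySem.Chars.count l [a, b] = pairCnt a b l := by
  unfold PySem.Chars.count
  rw [if_neg (by simp)]
  rw [count_go_pair a b hab l.length l 0 le_rfl]
  omega

theorem chars_count_one (l : List Char) (c : Char) :
    PySem.Chars.count l [c] = l.count c := by
  unfold PySem.Chars.count
  rw [if_neg (by simp)]
  rw [count_go_one c l.length l 0 le_rfl]
  omega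

theorem costA_eq (x y : Int) (t : List Char) :
    (PySem.Chars.count t ['C', 'J'] : Int) * x + (PySem.Chars.count t ['J', 'C'] : Int) * y
      = costPairs x y t := by
  rw [chars_count_pair t 'C' 'J' (by decide), chars_count_pair t 'J' 'C' (by decide)]
  induction t with
  | nil => simp [pairCnt, costPairs]
  | cons d t ih =>
    cases t with
    | nil => simp [pairCnt, costPairs]
    | cons e t2 =>
      have h1 : pairCnt 'C' 'J' (d :: e :: t2) = (if d = 'C' ∧ e = 'J' then 1 else 0) + pairCnt 'C' 'J' (e :: t2) := rfl
      have h2 : pairCnt 'J' 'C' (d :: e :: t2) = (if d = 'J' ∧ e = 'C' then 1 else 0) + pairCnt 'J' 'C' (e :: t2) := rfl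
      have h3 : costPairs x y (d :: e :: t2) = qstep x y d e + costPairs x y (e :: t2) := rfl
      rw [h1, h2, h3, ← ih]
      push_cast
      unfold qstep
      by_cases hcj : d = 'C' ∧ e = 'J' <;> by_cases hjc : d = 'J' ∧ e = 'C' <;>
        first
        | (exact absurd (hcj.1.symm.trans hjc.1) (by decide))
        | (simp [hcj, hjc] <;> ring)

-- ---- binary strings ----
theorem toDigitsCore_acc (fuel n : Nat) (ds : List Char) :
    Nat.toDigitsCore 2 fuel n ds = Nat.toDigitsCore 2 fuel n [] ++ ds := by
  induction fuel generalizing n ds with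
  | zero => simp [Nat.toDigitsCore]
  | succ fuel ih =>
    simp only [Nat.toDigitsCore]
    by_cases h : n / 2 = 0
    · simp [h]
    · simp only [h, if_false]
      rw [ih (n / 2) ((n % 2).digitChar :: ds), ih (n / 2) [(n % 2).digitChar]]
      simp

theorem toDigitsCore_fuel (n : Nat) :
    ∀ (f1 f2 : Nat), n < f1 → n < f2 →
      Nat.toDigitsCore 2 f1 n [] = Nat.toDigitsCore 2 f2 n [] := by
  induction n using Nat.strong_induction_on with
  | _ n ih =>
    intro f1 f2 h1 h2
    cases f1 with
    | zero => omega
    | succ g1 =>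
      cases f2 with
      | zero => omega
      | succ g2 =>
        simp only [Nat.toDigitsCore]
        by_cases h : n / 2 = 0
        · simp [h]
        · simp only [h, if_false]
          rw [toDigitsCore_acc g1, toDigitsCore_acc g2]
          rw [ih (n / 2) (by omega) g1 g2 (by omega) (by omega)]

theorem toDigits_two_rec (n : Nat) (h : 2 ≤ n) :
    Nat.toDigits 2 n = Nat.toDigits 2 (n / 2) ++ [(n % 2).digitChar] := by
  unfold Nat.toDigits
  have hnz : ¬ n / 2 = 0 := by omega
  conv_lhs => rw [show Nat.toDigitsCore 2 (n + 1) n [] =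
    Nat.toDigitsCore 2 n (n / 2) [(n % 2).digitChar] by simp only [Nat.toDigitsCore, hnz, if_false]]
  rw [toDigitsCore_acc]
  rw [toDigitsCore_fuel (n / 2) n (n / 2 + 1) (by omega) (by omega)]

theorem toDigits_two_len (q : Nat) (hq : 1 ≤ q) : ∀ n : Nat, n < 2 ^ q →
    (Nat.toDigits 2 n).length ≤ q := by
  induction q with
  | zero => omega
  | succ q ih =>
    intro n hn
    by_cases h2 : n < 2
    · interval_cases n <;> simp [Nat.toDigits, Nat.toDigitsCore]
    · rw [toDigits_two_rec n (by omega)]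
      by_cases hq1 : 1 ≤ q
      · have := ih hq1 (n / 2) (by
          have : 2 ^ (q + 1) = 2 ^ q * 2 := by ring
          omega)
        simp only [List.length_append, List.length_cons, List.length_nil]
        omega
      · -- q = 0 : n < 2, contradiction with ¬ n < 2
        have hq0 : q = 0 := by omega
        subst hq0
        norm_num at hn
        omega

theorem bitsBE_zero (q : Nat) : bitsBE q 0 = List.replicate q '0' := by
  induction q with
  | zero => rfl
  | succ q ih =>
    simp only [bitsBE, Nat.zero_div, Nat.zero_mod, ih, if_pos rfl]
    rfl

theorem bitsBE_snoc (q n : Nat) (hn : n < 2 ^ (q + 1)) :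
    bitsBE (q + 1) n = bitsBE q (n / 2) ++ [if n % 2 = 0 then '0' else '1'] := by
  induction q generalizing n with
  | zero =>
    simp only [bitsBE, pow_zero, Nat.div_one, List.nil_append]
    have : n < 2 := by omega
    interval_cases n <;> simp [bitsBE]
  | succ q ih =>
    have hmod : n % 2 ^ (q + 1) < 2 ^ (q + 1) := Nat.mod_lt _ (by positivity)
    have e1 : bitsBE (q + 2) n = (if n / 2 ^ (q + 1) = 0 then '0' else '1') :: bitsBE (q + 1) (n % 2 ^ (q + 1)) := rfl
    rw [e1, ih (n % 2 ^ (q + 1)) hmod]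
    have e2 : bitsBE (q + 1) (n / 2) = (if (n / 2) / 2 ^ q = 0 then '0' else '1') :: bitsBE q ((n / 2) % 2 ^ q) := rfl
    rw [e2]
    have f1 : (n / 2) / 2 ^ q = n / 2 ^ (q + 1) := by
      rw [Nat.div_div_eq_div_mul]
      congr 1
      ring
    have f2 : (n % 2 ^ (q + 1)) / 2 = (n / 2) % 2 ^ q := by
      have : (2 : Nat) ^ (q + 1) = 2 * 2 ^ q := by ring
      rw [this, Nat.mod_mul_right_div_self]
    have f3 : (n % 2 ^ (q + 1)) % 2 = n % 2 := by
      apply Nat.mod_mod_of_dvd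
      exact ⟨2 ^ q, by ring⟩
    rw [f1, f2, f3]
    simp

theorem pad_toDigits_eq_bitsBE (q : Nat) (hq : 1 ≤ q) : ∀ n : Nat, n < 2 ^ q →
    List.replicate (q - (Nat.toDigits 2 n).length) '0' ++ Nat.toDigits 2 n = bitsBE q n := by
  induction q with
  | zero => omega
  | succ q ih =>
    intro n hn
    by_cases hq1 : 1 ≤ q
    · rw [bitsBE_snoc q n hn]
      by_cases h2 : 2 ≤ n
      · rw [toDigits_two_rec n h2]
        have hrec : bitsBE q (n / 2) = List.replicate (q - (Nat.toDigits 2 (n / 2)).length) '0'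
            ++ Nat.toDigits 2 (n / 2) := by
          rw [ih hq1 (n / 2) (by
            have : (2:Nat) ^ (q + 1) = 2 ^ q * 2 := by ring
            omega)]
        rw [hrec]
        have hlen : (Nat.toDigits 2 (n / 2)).length ≤ q :=
          toDigits_two_len q hq1 (n / 2) (by
            have : (2:Nat) ^ (q + 1) = 2 ^ q * 2 := by ring
            omega)
        have hd : (n % 2).digitChar = if n % 2 = 0 then '0' else '1' := by
          have : n % 2 = 0 ∨ n % 2 = 1 := by omega
          rcases this with h | h <;> rw [h] <;> rfl
        rw [hd]
        simp only [List.length_append, List.length_cons, List.length_nil]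
        rw [show q + 1 - ((Nat.toDigits 2 (n / 2)).length + (0 + 1)) = q - (Nat.toDigits 2 (n / 2)).length by omega]
        simp [List.append_assoc]
      · -- n = 0 or 1
        have hd0 : n / 2 = 0 := by omega
        rw [hd0, bitsBE_zero]
        have : n = 0 ∨ n = 1 := by omega
        rcases this with h | h <;> subst h <;>
          simp [Nat.toDigits, Nat.toDigitsCore, List.replicate_succ'] <;> rfl
    · have hq0 : q = 0 := by omega
      subst hq0
      norm_num at hn
      have : n = 0 ∨ n = 1 := by omega
      rcases this with h | h <;> subst h <;> simp [Nat.toDigits, Nat.toDigitsCore, bitsBE] <;> decide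

-- ---- qIdx / fill ----
theorem qIdx_length (sl : List Char) : (qIdx sl).length = sl.count '?' := by
  induction sl with
  | nil => rfl
  | cons c t ih =>
    by_cases hc : c = '?' <;>
      simp [qIdx, hc, List.count_cons, ih]

theorem range_filter_eq_qIdx (sl : List Char) :
    (List.range sl.length).filter (fun k => sl.getD k ' ' == '?') = qIdx sl := by
  induction sl with
  | nil => rfl
  | cons c t ih =>
    rw [List.length_cons, List.range_succ_eq_map, List.filter_cons]
    have hmap : (List.map Nat.succ (List.range t.length)).filter (fun k => (c :: t).getD k ' ' == '?')
        = ((List.range t.length).filter (fun k => t.getD k ' ' == '?')).map Nat.succ := by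
      rw [List.filter_map]
      rfl
    rw [hmap, ih]
    by_cases hc : c = '?'
    · rw [if_pos (by simp [hc])]
      simp only [qIdx, if_pos hc]
    · rw [if_neg (by simp [hc])]
      simp only [qIdx, if_neg hc]

theorem fill_length (sl bs : List Char) : (fill sl bs).length = sl.length := by
  induction sl generalizing bs with
  | nil => rfl
  | cons c t ih =>
    by_cases hc : c = '?'
    · cases bs <;> simp [fill, hc, ih]
    · simp [fill, hc, ih]

theorem fill_agree (sl bs : List Char) :
    ∀ k, k < sl.length → sl.getD k ' ' ≠ '?' → (fill sl bs).getD k ' ' = sl.getD k ' ' := by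
  induction sl generalizing bs with
  | nil => intro k h; simp at h
  | cons c t ih =>
    intro k hk hq
    by_cases hc : c = '?'
    · cases bs with
      | nil =>
        cases k with
        | zero => simp [hc] at hq
        | succ k => simp only [fill, hc, if_pos rfl, List.getD_cons_succ]; exact ih [] k (by simpa using hk) (by simpa using hq)
      | cons b bs' =>
        cases k with
        | zero => simp [hc] at hq
        | succ k => simp only [fill, hc, if_pos rfl, List.getD_cons_succ]; exact ih bs' k (by simpa using hk) (by simpa using hq)
    · cases k with
      | zero => simp [fill, hc]
      | succ k => simp only [fill, hc, if_neg hc, List.getD_cons_succ]; exact ih bs k (by simpa using hk) (by simpa using hq)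

theorem fill_noq (sl : List Char) (bs : List Char) (h : sl.count '?' = 0) : fill sl bs = sl := by
  induction sl generalizing bs with
  | nil => rfl
  | cons c t ih =>
    have hc : c ≠ '?' := by
      intro hc
      subst hc
      simp [List.count_cons] at h
    have ht : t.count '?' = 0 := by
      simp [List.count_cons] at h
      omega
    simp [fill, hc, ih bs ht]

theorem setfold_shift (prs : List (Nat × Char)) (h : Char) :
    ∀ tt : List Char,
      List.foldl (fun u (pb : Nat × Char) => u.set pb.1 (if pb.2 == '1' then 'C' else 'J')) (h :: tt)
        (prs.map (fun p => (p.1 + 1, p.2)))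
      = h :: List.foldl (fun u (pb : Nat × Char) => u.set pb.1 (if pb.2 == '1' then 'C' else 'J')) tt prs := by
  induction prs with
  | nil => intro tt; rfl
  | cons p prs ih =>
    intro tt
    simp only [List.map_cons, List.foldl_cons, List.set_cons_succ]
    exact ih (tt.set p.1 (if p.2 == '1' then 'C' else 'J'))

theorem setfold_fill (sl : List Char) :
    ∀ (t bs : List Char), t.length = sl.length →
      (∀ k, k < sl.length → sl.getD k ' ' ≠ '?' → t.getD k ' ' = sl.getD k ' ') →
      (qIdx sl).length ≤ bs.length →
      List.foldl (fun u (pb : Nat × Char) => u.set pb.1 (if pb.2 == '1' then 'C' else 'J')) t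
        ((qIdx sl).zip bs)
      = fill sl bs := by
  induction sl with
  | nil =>
    intro t bs hlen _ _
    have : t = [] := List.eq_nil_of_length_eq_zero hlen
    subst this
    rfl
  | cons c sl' ih =>
    intro t bs hlen hagree hbs
    cases t with
    | nil => simp at hlen
    | cons t0 t' =>
      have hlen' : t'.length = sl'.length := by simpa using hlen
      by_cases hc : c = '?'
      · subst hc
        cases bs with
        | nil => simp [qIdx] at hbs
        | cons b bs' =>
          have hq : qIdx ('?' :: sl') = 0 :: (qIdx sl').map (· + 1) := by simp [qIdx]
          rw [hq]
          have hzip : ((0 : Nat) :: (qIdx sl').map (· + 1)).zip (b :: bs')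
              = (0, b) :: ((qIdx sl').map (· + 1)).zip bs' := rfl
          rw [hzip, List.foldl_cons]
          have hset : (t0 :: t').set 0 (if b == '1' then 'C' else 'J')
              = (if b == '1' then 'C' else 'J') :: t' := rfl
          rw [hset]
          have hzm : ((qIdx sl').map (· + 1)).zip bs' = ((qIdx sl').zip bs').map (fun p => (p.1 + 1, p.2)) := by
            rw [List.zip_map_left]
            rfl
          rw [hzm, setfold_shift]
          rw [ih t' bs' hlen'
            (fun k hk hkq => by
              have := hagree (k + 1) (by simpa using hk) (by simpa using hkq)
              simpa using this)
            (by simp [qIdx] at hbs; simpa using hbs)]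
          simp [fill]
      · have hq : qIdx (c :: sl') = (qIdx sl').map (· + 1) := by simp [qIdx, hc]
        rw [hq]
        have hzm : ((qIdx sl').map (· + 1)).zip bs = ((qIdx sl').zip bs).map (fun p => (p.1 + 1, p.2)) := by
          rw [List.zip_map_left]
          rfl
        rw [hzm, setfold_shift]
        have ht0 : t0 = c := by
          have := hagree 0 (by simp) (by simpa using hc)
          simpa using this
        rw [ih t' bs hlen'
          (fun k hk hkq => by
            have := hagree (k + 1) (by simpa using hk) (by simpa using hkq)
            simpa using this)
          (by simp [qIdx, hc] at hbs; simpa using hbs)]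
        simp [fill, hc, ht0]

theorem enum_comps (t : List Char) :
    (List.range (2 ^ (t.count '?'))).map (fun i => fill t (bitsBE (t.count '?') i)) = comps t := by
  induction t with
  | nil => rfl
  | cons c t' ih =>
    by_cases hc : c = '?'
    · subst hc
      have hq : ('?' :: t').count '?' = t'.count '?' + 1 := by simp [List.count_cons]
      rw [hq]
      set q := t'.count '?' with hqdef
      have hpow : 2 ^ (q + 1) = 2 ^ q + 2 ^ q := by ring
      rw [hpow, List.range_add, List.map_append]
      have h1 : (List.range (2 ^ q)).map (fun i => fill ('?' :: t') (bitsBE (q + 1) i))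
          = (List.range (2 ^ q)).map (fun i => 'J' :: fill t' (bitsBE q i)) := by
        apply List.map_congr_left
        intro i hi
        rw [List.mem_range] at hi
        have hb : bitsBE (q + 1) i = '0' :: bitsBE q i := by
          simp [bitsBE, Nat.div_eq_of_lt hi, Nat.mod_eq_of_lt hi]
        rw [hb]
        simp [fill]
      have h2 : ((List.range (2 ^ q)).map (fun x => 2 ^ q + x)).map (fun i => fill ('?' :: t') (bitsBE (q + 1) i))
          = (List.range (2 ^ q)).map (fun i => 'C' :: fill t' (bitsBE q i)) := by
        rw [List.map_map]
        apply List.map_congr_left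
        intro j hj
        rw [List.mem_range] at hj
        have hpos : 0 < 2 ^ q := by positivity
        have hdiv : (2 ^ q + j) / 2 ^ q = 1 := by
          rw [Nat.add_comm, Nat.add_div_right _ hpos, Nat.div_eq_of_lt hj]
        have hmod : (2 ^ q + j) % 2 ^ q = j := by
          rw [Nat.add_mod_left, Nat.mod_eq_of_lt hj]
        have hb : bitsBE (q + 1) (2 ^ q + j) = '1' :: bitsBE q j := by
          simp [bitsBE, hdiv, hmod]
        show fill ('?' :: t') (bitsBE (q + 1) (2 ^ q + j)) = _
        rw [hb]
        simp [fill]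
      rw [h1, h2]
      rw [show comps ('?' :: t') = (comps t').map (fun u => 'J' :: u) ++ (comps t').map (fun u => 'C' :: u) by
        simp [comps]]
      rw [← ih, List.map_map, List.map_map]
      rfl
    · have hq : (c :: t').count '?' = t'.count '?' := by simp [List.count_cons, hc]
      rw [hq]
      have h1 : (List.range (2 ^ t'.count '?')).map (fun i => fill (c :: t') (bitsBE (t'.count '?') i))
          = (List.range (2 ^ t'.count '?')).map (fun i => c :: fill t' (bitsBE (t'.count '?') i)) := by
        apply List.map_congr_left
        intro i _
        simp [fill, hc]
      rw [h1, show comps (c :: t') = (comps t').map (fun u => c :: u) by simp [comps, hc]]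
      rw [← ih, List.map_map]
      rfl

theorem foldl_range_zip (ps : List Nat) :
    ∀ (bs : List Char) (t : List Char), ps.length ≤ bs.length →
    (List.range ps.length).foldl
        (fun u k => u.set (ps.getD k 0) (if bs.getD k ' ' == '1' then 'C' else 'J')) t
      = (ps.zip bs).foldl (fun u (pb : Nat × Char) => u.set pb.1 (if pb.2 == '1' then 'C' else 'J')) t := by
  induction ps with
  | nil => intro bs t _; rfl
  | cons p ps' ih =>
    intro bs t h
    cases bs with
    | nil => simp at h
    | cons b bs' =>
      rw [List.length_cons, List.range_succ_eq_map, List.foldl_cons, List.foldl_map]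
      have hbody : (fun (u : List Char) (k : Nat) =>
          u.set ((p :: ps').getD k.succ 0) (if (b :: bs').getD k.succ ' ' == '1' then 'C' else 'J'))
          = fun u k => u.set (ps'.getD k 0) (if bs'.getD k ' ' == '1' then 'C' else 'J') := by
        funext u k
        simp
      rw [hbody]
      have h' : ps'.length ≤ bs'.length := by simpa using h
      rw [ih bs' _ h']
      simp

theorem slice_toBin0b (m : Nat) :
    PySem.List.slice (PySem.Int.toBinChars0b (m : Nat)) (some 2) none = Nat.toDigits 2 m := by
  unfold PySem.Int.toBinChars0b
  rw [if_neg (by omega)]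
  rw [PySem.List.slice_from _ (by norm_num : (0:Int) ≤ 2)]
  simp

theorem fill_pad (sl : List Char) (m : Nat) (hm : m < 2 ^ sl.count '?') :
    fill sl (List.replicate (sl.count '?' - (Nat.toDigits 2 m).length) '0' ++ Nat.toDigits 2 m)
      = fill sl (bitsBE (sl.count '?') m) := by
  by_cases hq : 1 ≤ sl.count '?'
  · rw [pad_toDigits_eq_bitsBE _ hq m hm]
  · have h0 : sl.count '?' = 0 := by omega
    rw [fill_noq _ _ h0, fill_noq _ _ h0]

def innerB (sl : List Char) (m : Nat) : List Char :=
  List.replicate (sl.count '?' - (Nat.toDigits 2 m).length) '0' ++ Nat.toDigits 2 m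

def innerFold (sl t0 : List Char) (m : Nat) : List Char :=
  List.foldl (fun u k => u.set ((List.map (Nat.cast : Nat → Int) (qIdx sl)).getD k 0).toNat
      (if ((innerB sl m).getD k ' ' == '1') = true then 'C' else 'J')) t0
    (List.range (sl.count '?'))

theorem map_natcast_getD_toNat (ps : List Nat) : ∀ k : Nat,
    (((ps.map (Nat.cast : Nat → Int)).getD k 0).toNat) = ps.getD k 0 := by
  induction ps with
  | nil => intro k; simp
  | cons p t ih =>
    intro k
    cases k with
    | zero => simp
    | succ k => simpa using ih k

theorem innerFold_eq (sl t0 : List Char) (m : Nat)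
    (hlen : t0.length = sl.length)
    (hag : ∀ k, k < sl.length → sl.getD k ' ' ≠ '?' → t0.getD k ' ' = sl.getD k ' ')
    (hm : m < 2 ^ sl.count '?') :
    innerFold sl t0 m = fill sl (bitsBE (sl.count '?') m) := by
  unfold innerFold
  have hbody : (fun (u : List Char) (k : Nat) => u.set ((List.map (Nat.cast : Nat → Int) (qIdx sl)).getD k 0).toNat
        (if ((innerB sl m).getD k ' ' == '1') = true then 'C' else 'J'))
      = fun u k => u.set ((qIdx sl).getD k 0) (if (innerB sl m).getD k ' ' == '1' then 'C' else 'J') := by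
    funext u k
    rw [map_natcast_getD_toNat]
  rw [hbody]
  have hlb : (qIdx sl).length ≤ (innerB sl m).length := by
    unfold innerB
    rw [qIdx_length, List.length_append, List.length_replicate]
    omega
  rw [show List.range (sl.count '?') = List.range (qIdx sl).length by rw [qIdx_length]]
  rw [foldl_range_zip (qIdx sl) (innerB sl m) t0 hlb]
  rw [setfold_fill sl t0 (innerB sl m) hlen hag hlb]
  unfold innerB
  exact fill_pad sl m hm

theorem outer_kernel (x y : Int) (sl : List Char) :
    ∀ (L : List Nat) (t0 : List Char) (a0 : Option Int),
      (∀ i ∈ L, i < 2 ^ sl.count '?') →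
      t0.length = sl.length →
      (∀ k, k < sl.length → sl.getD k ' ' ≠ '?' → t0.getD k ' ' = sl.getD k ' ') →
      (List.foldl (fun (st : List Char × Option Int) i =>
          (innerFold sl st.1 i,
           match st.2 with
           | none => some ((PySem.Chars.count (innerFold sl st.1 i) ['C','J'] : Int) * x
               + (PySem.Chars.count (innerFold sl st.1 i) ['J','C'] : Int) * y)
           | some a => some (min a ((PySem.Chars.count (innerFold sl st.1 i) ['C','J'] : Int) * x
               + (PySem.Chars.count (innerFold sl st.1 i) ['J','C'] : Int) * y))))
        (t0, a0) L).2
      = L.foldl (fun a i => match a with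
          | none => some (costPairs x y (fill sl (bitsBE (sl.count '?') i)))
          | some w => some (min w (costPairs x y (fill sl (bitsBE (sl.count '?') i))))) a0 := by
  intro L
  induction L with
  | nil => intro t0 a0 _ _ _; rfl
  | cons i L' ih =>
    intro t0 a0 hmem hlen hag
    rw [List.foldl_cons, List.foldl_cons]
    have hi : i < 2 ^ sl.count '?' := hmem i List.mem_cons_self
    have hfe : innerFold sl t0 i = fill sl (bitsBE (sl.count '?') i) := innerFold_eq sl t0 i hlen hag hi
    have hcost : (PySem.Chars.count (innerFold sl t0 i) ['C','J'] : Int) * x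
        + (PySem.Chars.count (innerFold sl t0 i) ['J','C'] : Int) * y
        = costPairs x y (fill sl (bitsBE (sl.count '?') i)) := by
      rw [hfe, costA_eq]
    have hnlen : (innerFold sl t0 i).length = sl.length := by rw [hfe, fill_length]
    have hnag : ∀ k, k < sl.length → sl.getD k ' ' ≠ '?' →
        (innerFold sl t0 i).getD k ' ' = sl.getD k ' ' := by
      intro k hk hq
      rw [hfe]
      exact fill_agree sl _ k hk hq
    rw [ih _ _ (fun j hj => hmem j (List.mem_cons_of_mem i hj)) hnlen hnag]
    congr 1
    cases a0 with
    | none => simp [hcost]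
    | some a => simp [hcost]

theorem foldl_ostep_eq_optMin (f : Nat → Int) (l : List Nat) :
    l.foldl (fun a i => match a with
      | none => some (f i)
      | some w => some (min w (f i))) none = optMin (l.map f) := by
  rw [optMin, List.foldl_map]

theorem solver_slow_A_char (x y : Int) (s : String) :
    solver_slow x y s = (optMin ((comps s.toList).map (costPairs x y))).getD 0 := by
  simp only [solver_slow, PySem.Str.count_eq,
    show ("?" : String).toList = ['?'] from rfl, chars_count_one,
    PySem.List.pyRange_zero_natCast, List.foldl_map,
    PySem.List.pyGetD_natCast, PySem.List.foldl_append_if, range_filter_eq_qIdx,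
    slice_toBin0b]
  show (List.foldl (fun (st : List Char × Option Int) (i : Nat) =>
      (innerFold s.toList st.1 i,
       match st.2 with
       | none => some ((PySem.Chars.count (innerFold s.toList st.1 i) ['C','J'] : Int) * x
           + (PySem.Chars.count (innerFold s.toList st.1 i) ['J','C'] : Int) * y)
       | some a => some (min a ((PySem.Chars.count (innerFold s.toList st.1 i) ['C','J'] : Int) * x
           + (PySem.Chars.count (innerFold s.toList st.1 i) ['J','C'] : Int) * y))))
    (s.toList, (none : Option Int)) (List.range (2 ^ s.toList.count '?'))).2.getD 0 = _
  rw [outer_kernel x y s.toList (List.range (2 ^ s.toList.count '?')) s.toList none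
      (fun i hi => List.mem_range.mp hi) rfl (fun k hk hq => rfl)]
  rw [foldl_ostep_eq_optMin]
  rw [show (List.range (2 ^ s.toList.count '?')).map
        (fun i => costPairs x y (fill s.toList (bitsBE (s.toList.count '?') i)))
      = (comps s.toList).map (costPairs x y) by
    rw [← enum_comps s.toList, List.map_map]
    rfl]

-- ===== VERDICT (by name: the statement is the Claim_ definition above) =====
theorem solver_slow_spec : Claim_equal_solver_slow := by
  intro x y s _
  unfold Spec_solver_slow
  rw [solver_slow_A_char, solver_slow_B_char]
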